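-- pv_equiv track=rewrite | github.com/ghostrider77/improve_coding_skills | Python/string_algorithms/07_inverse_Burrows_Wheeler.py | create_indexed_column
-- ===== SOURCE A (Python) =====
-- from collections import defaultdict
--
-- def create_indexed_column(string):
--     counts = defaultdict(int)
--     string_and_index = []
--     for letter in string:
--         count = counts[letter]
--         string_and_index.append((letter, count))
--         counts[letter] += 1
--     return string_and_index
-- ===== SOURCE B (Python) =====
-- def create_indexed_column(string):
--     string_and_index = []
--     for letter in reversed(string):
--         string_and_index = [(letter, 0)] + [
--             (l, k + 1 if l == letter else k) for l, k in string_and_index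
--         ]
--     return string_and_index
-- ===== Notes on version B (the rewrite author's own statement) =====
-- stated objective: alternative
-- what changed: B builds the result back-to-front with no counter table: it scans the string in reverse, prepending (letter, 0) and incrementing the stored index of every later occurrence of that letter in the result built so far.
import Mathlib
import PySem

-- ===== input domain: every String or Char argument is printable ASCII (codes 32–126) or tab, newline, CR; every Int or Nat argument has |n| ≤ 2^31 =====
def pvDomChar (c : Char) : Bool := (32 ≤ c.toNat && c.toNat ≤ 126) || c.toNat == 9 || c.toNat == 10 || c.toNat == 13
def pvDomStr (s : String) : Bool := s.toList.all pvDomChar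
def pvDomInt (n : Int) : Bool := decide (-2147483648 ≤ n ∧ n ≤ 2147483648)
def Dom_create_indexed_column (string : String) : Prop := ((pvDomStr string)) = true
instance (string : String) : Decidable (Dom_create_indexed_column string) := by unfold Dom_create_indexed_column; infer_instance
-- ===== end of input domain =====

-- B replaces A's forward pass with a running defaultdict counter by a reverse pass that
-- keeps no counts at all: it prepends (letter, 0) and bumps every later occurrence of
-- that letter in the result built so far (alternative decomposition; not faster).

-- ===== PORT A =====
-- running counter: read defaultdict value (0 if absent), append (letter, count), increment
def create_indexed_column (string : String) : List (String × Int) :=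
  (string.toList.foldl
    (fun (st : PySem.Dict String Int × List (String × Int)) letter =>
      let l := String.singleton letter
      let count := st.1.getD l 0
      (st.1.insert l (count + 1), st.2 ++ [(l, count)]))
    (PySem.Dict.empty, [])).2

-- ===== PORT B =====
-- for letter in reversed(string): prepend (letter, 0), bump later occurrences of letter
def create_indexed_column_alt (string : String) : List (String × Int) :=
  string.toList.reverse.foldl
    (fun string_and_index letter =>
      let l := String.singleton letter
      (l, 0) :: string_and_index.map
        (fun lk => (lk.1, if lk.1 == l then lk.2 + 1 else lk.2)))
    []

-- ===== PRECONDITION & SPEC =====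
def Spec_create_indexed_column (string : String) (out : List (String × Int)) : Prop := out = create_indexed_column_alt string
instance (string : String) (out : List (String × Int)) : Decidable (Spec_create_indexed_column string out) := by unfold Spec_create_indexed_column; infer_instance

-- ===== CLAIM (what is proved, stated in full; the proofs are below) =====
def Claim_equal_create_indexed_column : Prop := ∀ (string : String), Dom_create_indexed_column string → Spec_create_indexed_column string (create_indexed_column string)

-- ===== LEMMAS AND PROOFS =====

-- the common canonical form both ports are reduced to: each letter paired with its
-- count in the prefix before it
def pvCanon (L : List String) : List (String × Int) :=
  (PySem.List.enumerate L).map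
    (fun ic => (ic.2, ((PySem.List.slice L none (some ic.1)).count ic.2 : Int)))

-- A's loop step, on the already-wrapped one-letter strings
def pvStepA (st : PySem.Dict String Int × List (String × Int)) (x : String) :
    PySem.Dict String Int × List (String × Int) :=
  (st.1.insert x (st.1.getD x 0 + 1), st.2 ++ [(x, st.1.getD x 0)])

-- B's loop step, on the already-wrapped one-letter strings
def pvStepB (x : String) (acc : List (String × Int)) : List (String × Int) :=
  (x, 0) :: acc.map (fun lk => (lk.1, if lk.1 == x then lk.2 + 1 else lk.2))

-- the dict component of A's fold is the plain counting fold
lemma fst_foldA (L : List String) (d : PySem.Dict String Int) (acc : List (String × Int)) :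
    (L.foldl pvStepA (d, acc)).1 = L.foldl (fun d x => d.insert x (d.getD x 0 + 1)) d := by
  induction L generalizing d acc with
  | nil => rfl
  | cons x L ih => simpa [pvStepA] using ih _ _

-- A's fold equals the canonical form (reverse induction: A appends at the right)
lemma foldA_eq_canon (L : List String) :
    (L.foldl pvStepA (PySem.Dict.empty, [])).2 = pvCanon L := by
  induction L using List.reverseRecOn with
  | nil => rfl
  | append_singleton L x ih =>
    rw [List.foldl_append]
    have hd : (L.foldl pvStepA (PySem.Dict.empty, [])).1.getD x 0 = (L.count x : Int) := by
      rw [fst_foldA]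
      simpa using PySem.Dict.getD_foldl_insert_add_one L PySem.Dict.empty x
    have henum : PySem.List.enumerate (L ++ [x]) =
        PySem.List.enumerate L ++ [((L.length : Int), x)] := by
      simp [PySem.List.enumerate_append, PySem.List.enumerate_cons,
        PySem.List.enumerate_nil]
    have hcongr :
        (PySem.List.enumerate L).map
          (fun ic => (ic.2, ((PySem.List.slice (L ++ [x]) none (some ic.1)).count ic.2 : Int))) =
        (PySem.List.enumerate L).map
          (fun ic => (ic.2, ((PySem.List.slice L none (some ic.1)).count ic.2 : Int))) := by
      apply List.map_congr_left
      intro ic hic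
      obtain ⟨k, hk, rfl⟩ := (PySem.List.mem_enumerate_iff _ _ _).mp hic
      simp only [Int.zero_add, PySem.List.slice_to_natCast]
      rw [List.take_append_of_le_length (le_of_lt hk)]
    have hsplit : pvCanon (L ++ [x]) = pvCanon L ++ [(x, (L.count x : Int))] := by
      unfold pvCanon
      rw [henum, List.map_append, hcongr]
      simp only [List.map_cons, List.map_nil, PySem.List.slice_to_natCast,
        List.take_left]
    rw [hsplit, ← ih]
    simp [pvStepA, hd]

-- shifting enumerate's start by one is mapping +1 over the indices
lemma enumerate_shift {α : Type} (xs : List α) (s : Int) :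
    PySem.List.enumerate xs (s + 1) =
      (PySem.List.enumerate xs s).map (fun p => (p.1 + 1, p.2)) := by
  induction xs generalizing s with
  | nil => simp [PySem.List.enumerate_nil]
  | cons y ys ih =>
    simp [PySem.List.enumerate_cons, ih (s + 1)]

-- B's right fold equals the canonical form (cons induction: B prepends at the left)
lemma foldrB_eq_canon (L : List String) : L.foldr pvStepB [] = pvCanon L := by
  induction L with
  | nil => rfl
  | cons x L ih =>
    rw [List.foldr_cons, ih]
    have henum : PySem.List.enumerate (x :: L) =
        ((0 : Int), x) :: (PySem.List.enumerate L).map (fun p => (p.1 + 1, p.2)) := by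
      rw [PySem.List.enumerate_cons, show ((0 : Int) + 1) = 0 + 1 from rfl,
        enumerate_shift]
    show pvStepB x (pvCanon L) = pvCanon (x :: L)
    have hhead : ((PySem.List.slice (x :: L) none (some (0 : Int))).count x : Int) = 0 := by
      rw [show (some (0 : Int)) = some ((0 : Nat) : Int) from rfl,
        PySem.List.slice_to_natCast]
      simp
    have htail :
        (PySem.List.enumerate L).map
          ((fun ic => (ic.2, ((PySem.List.slice (x :: L) none (some ic.1)).count ic.2 : Int))) ∘
            (fun p => (p.1 + 1, p.2))) =
        (pvCanon L).map (fun lk => (lk.1, if lk.1 == x then lk.2 + 1 else lk.2)) := by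
      unfold pvCanon
      rw [List.map_map]
      apply List.map_congr_left
      intro ic hic
      obtain ⟨k, hk, rfl⟩ := (PySem.List.mem_enumerate_iff _ _ _).mp hic
      simp only [Function.comp_apply, Int.zero_add]
      have hcast : ((k : Int) + 1) = ((k + 1 : Nat) : Int) := by push_cast; ring
      rw [hcast]
      simp only [PySem.List.slice_to_natCast, List.take_succ_cons, List.count_cons]
      by_cases hx : L[k] == x
      · simp [hx]; simp at hx; exact hx.symm
      · simp [hx]; simp at hx; exact fun h => hx h.symm
    show (x, (0 : Int)) :: (pvCanon L).map (fun lk => (lk.1, if lk.1 == x then lk.2 + 1 else lk.2)) = _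
    conv_rhs => rw [pvCanon, henum, List.map_cons]
    rw [← htail, List.map_map]
    exact congrArg (· :: _) (by rw [hhead])

-- ===== VERDICT (by name: the statement is the Claim_ definition above) =====
theorem create_indexed_column_spec : Claim_equal_create_indexed_column := by
  intro string _
  show create_indexed_column string = create_indexed_column_alt string
  have hA : create_indexed_column string = pvCanon (string.toList.map String.singleton) := by
    show (string.toList.foldl (fun st letter => pvStepA st (String.singleton letter))
        (PySem.Dict.empty, [])).2 = _
    rw [← List.foldl_map]
    exact foldA_eq_canon _
  have hB : string.toList.foldr (fun letter acc => pvStepB (String.singleton letter) acc) [] =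
      pvCanon (string.toList.map String.singleton) := by
    rw [← List.foldr_map]
    exact foldrB_eq_canon _
  rw [hA, ← hB]
  show _ = string.toList.reverse.foldl (fun acc letter => pvStepB (String.singleton letter) acc) []
  rw [List.foldl_reverse]
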